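-- pv_equiv track=rewrite | github.com/stonsolabs/musical-instruments-platform | backend/app/services/simple_blog_generator.py | _estimate_word_count
-- ===== SOURCE A (Python) =====
-- from typing import Dict, List, Optional, Any
--
-- def _estimate_word_count(content: Dict) -> int:
--     """Estimate total word count of the blog post"""
--     total_words = 0
--
--     for section in content.get("sections", []):
--         if "content" in section:
--             # Simple word count estimation
--             text = section["content"].replace("#", "").replace("*", "").replace("-", "")
--             words = len(text.split())
--             total_words += words
--
--     return total_words
-- ===== SOURCE B (Python) =====
-- def _estimate_word_count(content) -> int:
--     """Estimate total word count of the blog post (single character-scan state machine)."""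
--     total = 0
--     for section in content.get("sections", []):
--         if "content" in section:
--             in_word = False
--             for ch in section["content"]:
--                 if ch == '#' or ch == '*' or ch == '-':
--                     continue
--                 if ch.isspace():
--                     in_word = False
--                 elif not in_word:
--                     total += 1
--                     in_word = True
--     return total
-- ===== Notes on version B (the rewrite author's own statement) =====
-- stated objective: alternative
-- what changed: Replaces the per-section build-three-intermediate-strings replace/replace/replace + split pipeline with a single fused character scan that skips '#','*','-' and counts word starts with an in_word flag, allocating no intermediate strings.
import Mathlib
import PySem

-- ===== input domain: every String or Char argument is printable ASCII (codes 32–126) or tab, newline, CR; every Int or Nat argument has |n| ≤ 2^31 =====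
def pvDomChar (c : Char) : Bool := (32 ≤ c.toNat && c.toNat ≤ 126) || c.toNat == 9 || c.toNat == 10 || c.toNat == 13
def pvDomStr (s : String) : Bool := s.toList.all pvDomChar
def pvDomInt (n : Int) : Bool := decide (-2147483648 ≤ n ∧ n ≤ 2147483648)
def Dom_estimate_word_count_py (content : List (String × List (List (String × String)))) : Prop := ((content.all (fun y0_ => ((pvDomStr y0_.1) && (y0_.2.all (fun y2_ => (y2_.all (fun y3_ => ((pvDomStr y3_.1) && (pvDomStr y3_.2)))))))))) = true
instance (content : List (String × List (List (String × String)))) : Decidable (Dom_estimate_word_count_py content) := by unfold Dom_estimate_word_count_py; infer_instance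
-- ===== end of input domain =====

-- B replaces A's per-section replace/replace/replace + split pipeline with one fused
-- character scan (skip '#','*','-', count word starts); alternative decomposition, same cost.


-- ===== PORT A =====
-- literal transliteration of _estimate_word_count: for each section of content.get("sections", []),
-- if "content" in section, strip '#','*','-' by three .replace calls, split on whitespace, add the count.
def estimate_word_count_py (content : List (String × List (List (String × String)))) : Int :=
  ((PySem.Dict.mk content).getD "sections" []).foldl
    (fun total_words sect =>
      if (PySem.Dict.mk sect).contains "content" then
        total_words +
          ((PySem.Str.split₀
            (PySem.Str.replace
              (PySem.Str.replace
                (PySem.Str.replace ((PySem.Dict.mk sect).getD "content" "") "#" "")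
                "*" "")
              "-" "")).length : Int)
      else total_words)
    0

-- ===== PORT B =====
-- one step of B's character state machine: state = (running total, in_word flag)
def pvBStep (st : Int × Bool) (ch : Char) : Int × Bool :=
  if ch == '#' || ch == '*' || ch == '-' then st
  else if PySem.Chars.isspace ch then (st.1, false)
  else if !st.2 then (st.1 + 1, true)
  else st

def estimate_word_count_py_alt (content : List (String × List (List (String × String)))) : Int :=
  ((PySem.Dict.mk content).getD "sections" []).foldl
    (fun total sect =>
      if (PySem.Dict.mk sect).contains "content" then
        ((((PySem.Dict.mk sect).getD "content" "").toList.foldl pvBStep (total, false)).1)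
      else total)
    0

-- ===== PRECONDITION & SPEC =====
def Spec_estimate_word_count_py (content : List (String × List (List (String × String)))) (out : Int) : Prop := out = estimate_word_count_py_alt content
instance (content : List (String × List (List (String × String)))) (out : Int) : Decidable (Spec_estimate_word_count_py content out) := by unfold Spec_estimate_word_count_py; infer_instance

-- ===== CLAIM (what is proved, stated in full; the proofs are below) =====
def Claim_equal_estimate_word_count_py : Prop := ∀ (content : List (String × List (List (String × String)))), Dom_estimate_word_count_py content → Spec_estimate_word_count_py content (estimate_word_count_py content)

-- ===== LEMMAS AND PROOFS =====

-- word count of a char list, given whether we are currently inside a word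
def pvWC : List Char → Bool → Nat
  | [], _ => 0
  | c :: t, inW =>
    if PySem.Chars.isspace c then pvWC t false
    else if inW then pvWC t true else pvWC t true + 1

theorem pvReplace_go_del (c : Char) :
    ∀ (fuel : Nat) (l acc : List Char), l.length ≤ fuel →
      PySem.Chars.replace.go [c] [] fuel l acc =
        acc.reverse ++ l.filter (fun x => !(x == c)) := by
  intro fuel
  induction fuel with
  | zero =>
    intro l acc h
    have : l = [] := List.eq_nil_of_length_eq_zero (Nat.le_zero.mp h)
    subst this
    simp [PySem.Chars.replace.go]
  | succ n ih =>
    intro l acc h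
    cases l with
    | nil => simp [PySem.Chars.replace.go]
    | cons c' t =>
      simp only [PySem.Chars.replace.go]
      by_cases hc : c = c'
      · subst hc
        have hp : [c].isPrefixOf (c :: t) = true := by simp [List.isPrefixOf]
        rw [hp]
        simp only [if_true, List.length_cons, List.length_nil, Nat.zero_add,
          List.drop_succ_cons, List.drop_zero, List.reverse_nil, List.nil_append] at *
        rw [ih t acc (by omega)]
        simp
      · have hp : [c].isPrefixOf (c' :: t) = false := by
          simp [List.isPrefixOf]; exact fun h => hc h
        rw [hp]
        simp only [Bool.false_eq_true, if_false]
        rw [ih t (c' :: acc) (by simpa using Nat.lt_succ_iff.mp (by simpa using h))]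
        simp [Ne.symm hc]

theorem pvReplace_del (c : Char) (cs : List Char) :
    PySem.Chars.replace cs [c] [] = cs.filter (fun x => !(x == c)) := by
  simp [PySem.Chars.replace, pvReplace_go_del c cs.length cs [] le_rfl]


theorem pvSplit₀_go_length :
    ∀ (l cur : List Char) (acc : List (List Char)),
      (PySem.Chars.split₀.go l cur acc).length =
        acc.length + (if cur.isEmpty then 0 else 1) + pvWC l (!cur.isEmpty) := by
  intro l
  induction l with
  | nil =>
    intro cur acc
    by_cases h : cur.isEmpty <;> simp [PySem.Chars.split₀.go, h, pvWC]
  | cons c t ih =>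
    intro cur acc
    by_cases hs : PySem.Chars.isspace c = true
    · by_cases h : cur.isEmpty
      · simp [PySem.Chars.split₀.go, hs, h, pvWC, ih]
      · simp [PySem.Chars.split₀.go, hs, h, pvWC, ih]
        try omega
    · by_cases h : cur.isEmpty
      · simp [PySem.Chars.split₀.go, hs, h, pvWC, ih]
        try omega
      · simp [PySem.Chars.split₀.go, hs, h, pvWC, ih]
        try omega

theorem pvSplit₀_length (cs : List Char) :
    (PySem.Chars.split₀ cs).length = pvWC cs false := by
  simpa [PySem.Chars.split₀] using pvSplit₀_go_length cs [] []

theorem pvFoldl_pvBStep (cs : List Char) :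
    ∀ (n : Int) (b : Bool),
      (cs.foldl pvBStep (n, b)).1 =
        n + pvWC (((cs.filter (fun x => !(x == '#'))).filter
                    (fun x => !(x == '*'))).filter (fun x => !(x == '-'))) b := by
  induction cs with
  | nil => intro n b; simp [pvWC]
  | cons c t ih =>
    intro n b
    by_cases h1 : c = '#'
    · subst h1; simp [pvBStep, ih]
    · by_cases h2 : c = '*'
      · subst h2; simp [pvBStep, ih]
      · by_cases h3 : c = '-'
        · subst h3; simp [pvBStep, ih]
        · by_cases hs : PySem.Chars.isspace c = true
          · simp [pvBStep, h1, h2, h3, hs, ih, pvWC]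
          · cases b with
            | false =>
              simp [pvBStep, h1, h2, h3, hs, ih, pvWC]
              omega
            | true =>
              simp [pvBStep, h1, h2, h3, hs, ih, pvWC]

-- the per-section step functions of the two ports agree
theorem pvStep_eq (total : Int) (section_ : List (String × String)) :
    (if (PySem.Dict.mk section_).contains "content" then
        total +
          ((PySem.Str.split₀
            (PySem.Str.replace
              (PySem.Str.replace
                (PySem.Str.replace ((PySem.Dict.mk section_).getD "content" "") "#" "")
                "*" "")
              "-" "")).length : Int)
      else total)
    =
    (if (PySem.Dict.mk section_).contains "content" then
        ((((PySem.Dict.mk section_).getD "content" "").toList.foldl pvBStep (total, false)).1)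
      else total) := by
  by_cases hc : (PySem.Dict.mk section_).contains "content" = true
  · simp only [hc, if_true]
    set s : String := (PySem.Dict.mk section_).getD "content" "" with hsdef
    have h1 : ("#" : String).toList = ['#'] := rfl
    have h2 : ("*" : String).toList = ['*'] := rfl
    have h3 : ("-" : String).toList = ['-'] := rfl
    have h0 : ("" : String).toList = [] := rfl
    rw [pvFoldl_pvBStep]
    simp only [PySem.Str.split₀, List.length_map, PySem.Str.toList_replace, h1, h2, h3, h0,
      pvReplace_del, pvSplit₀_length]
  · simp [hc]

-- ===== VERDICT (by name: the statement is the Claim_ definition above) =====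
theorem estimate_word_count_py_spec : Claim_equal_estimate_word_count_py := by
  intro content _
  unfold Spec_estimate_word_count_py estimate_word_count_py estimate_word_count_py_alt
  rw [show (fun total_words sect => _) = (fun total sect => _) from
    funext fun t => funext fun s => pvStep_eq t s]
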